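-- pv_equiv track=rewrite | github.com/Ninianna/pne.generating_function | gf.py | Enumeration
-- ===== SOURCE A (Python) =====
-- def Enumeration(cut_bounds):
--     s = cut_bounds[1]
--     e = cut_bounds[0]
--     def get_point(dim):
--         result = []
--         if(dim == len(s)):
--             result = [""]
--         else:
--             if(e[dim]<s[dim]):
--                 for i in range(e[dim],s[dim]+1):
--                     for r in get_point(dim+1):
--                         result.append(str(i)+","+r)
--             else:
--                 for i in range(s[dim],e[dim]+1):
--                     for r in get_point(dim+1):
--                         result.append(str(i)+","+r)
--         return result
--     g = get_point(0)
--     exp = []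
--     for i in g:
--         temp = i.split(',')
--         v = []
--         for j in temp[:-1]:
--             v.append(int(j))
--         exp.append(v)
--     return exp
-- ===== SOURCE B (Python) =====
-- def Enumeration(cut_bounds):
--     e, s = cut_bounds[0], cut_bounds[1]
--     points = [[]]
--     for d in range(len(s) - 1, -1, -1):
--         lo, hi = min(e[d], s[d]), max(e[d], s[d])
--         points = [[i] + p for i in range(lo, hi + 1) for p in points]
--     return points
-- ===== Notes on version B (the rewrite author's own statement) =====
-- stated objective: simpler
-- what changed: Replaces A's recursion that encodes each lattice point as a comma-joined string and then re-parses every string with int() by an iterative right-to-left Cartesian-product construction over per-dimension min/max ranges, with no string detour.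
import Mathlib
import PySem

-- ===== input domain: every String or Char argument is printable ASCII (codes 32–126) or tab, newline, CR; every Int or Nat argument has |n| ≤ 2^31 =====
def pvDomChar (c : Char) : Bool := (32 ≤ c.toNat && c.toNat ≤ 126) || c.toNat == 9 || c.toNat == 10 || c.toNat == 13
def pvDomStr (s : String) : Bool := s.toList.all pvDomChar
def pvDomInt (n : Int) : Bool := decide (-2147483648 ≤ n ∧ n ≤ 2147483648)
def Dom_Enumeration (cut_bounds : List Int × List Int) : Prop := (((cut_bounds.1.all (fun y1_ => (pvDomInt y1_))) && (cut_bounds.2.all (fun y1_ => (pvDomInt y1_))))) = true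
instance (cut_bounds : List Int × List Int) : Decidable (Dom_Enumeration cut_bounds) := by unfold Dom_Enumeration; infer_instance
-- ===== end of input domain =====

-- B replaces A's recursive string-join/split point encoding by an iterative
-- right-to-left Cartesian-product construction over per-dimension ranges (objective: simpler).

-- ===== PORT A =====
-- Python's inner recursive get_point(dim); strings are ported as List Char (PySem.Chars side).
-- The final `else []` branch is a totality guard only: Python reaches get_point only with dim ≤ len(s).
def pvGetPoint (e s : List Int) (dim : Nat) : List (List Char) :=
  if dim = s.length then [[]]
  else if _hd : dim < s.length then
    (if PySem.List.pyGetD e (dim : Int) 0 < PySem.List.pyGetD s (dim : Int) 0 then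
      (PySem.List.pyRange (PySem.List.pyGetD e (dim : Int) 0) (PySem.List.pyGetD s (dim : Int) 0 + 1) 1).foldl
        (fun result i => (pvGetPoint e s (dim + 1)).foldl
          (fun result r => result ++ [PySem.Int.toChars i ++ ',' :: r]) result) []
    else
      (PySem.List.pyRange (PySem.List.pyGetD s (dim : Int) 0) (PySem.List.pyGetD e (dim : Int) 0 + 1) 1).foldl
        (fun result i => (pvGetPoint e s (dim + 1)).foldl
          (fun result r => result ++ [PySem.Int.toChars i ++ ',' :: r]) result) [])
  else []
termination_by s.length - dim

-- int(j) is applied only to pieces produced by str(i), so it never raises; getD 0 is the total form.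
def Enumeration (cut_bounds : List Int × List Int) : List (List Int) :=
  let s := cut_bounds.2
  let e := cut_bounds.1
  let g := pvGetPoint e s 0
  g.foldl (fun exp i =>
    let temp := PySem.Chars.splitOn i [',']
    let v := (PySem.List.slice temp none (some (-1))).foldl
      (fun v j => v ++ [(PySem.Int.ofChars? j).getD 0]) ([] : List Int)
    exp ++ [v]) []

-- ===== PORT B =====
def Enumeration_alt (cut_bounds : List Int × List Int) : List (List Int) :=
  let e := cut_bounds.1
  let s := cut_bounds.2
  (PySem.List.pyRange ((s.length : Int) - 1) (-1) (-1)).foldl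
    (fun points d =>
      let lo := min (PySem.List.pyGetD e d 0) (PySem.List.pyGetD s d 0)
      let hi := max (PySem.List.pyGetD e d 0) (PySem.List.pyGetD s d 0)
      (PySem.List.pyRange lo (hi + 1) 1).flatMap (fun i => points.map (fun p => i :: p)))
    [[]]

-- ===== PRECONDITION & SPEC =====
-- Pre_ excludes exactly the inputs on which Python A raises IndexError: get_point reads e[dim]
-- for every dim < len(s), so A returns normally iff len(s) ≤ len(e).
def Pre_Enumeration (cut_bounds : List Int × List Int) : Prop :=
  cut_bounds.2.length ≤ cut_bounds.1.length
instance (cut_bounds : List Int × List Int) : Decidable (Pre_Enumeration cut_bounds) := by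
  unfold Pre_Enumeration; infer_instance

def pvWitness_Enumeration : (List Int × List Int) := ([0, 2], [1, 0])

def Spec_Enumeration (cut_bounds : List Int × List Int) (out : List (List Int)) : Prop := out = Enumeration_alt cut_bounds
instance (cut_bounds : List Int × List Int) (out : List (List Int)) : Decidable (Spec_Enumeration cut_bounds out) := by unfold Spec_Enumeration; infer_instance

-- ===== CLAIM (what is proved, stated in full; the proofs are below) =====
def Claim_equal_Enumeration : Prop := ∀ (cut_bounds : List Int × List Int), Dom_Enumeration cut_bounds → Pre_Enumeration cut_bounds → Spec_Enumeration cut_bounds (Enumeration cut_bounds)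

-- ===== LEMMAS AND PROOFS =====

-- ---- a reference splitter for sep = "," and its link to PySem.Chars.splitOn ----
def splitC : List Char → List (List Char)
  | [] => [[]]
  | c :: l => if c = ',' then [] :: splitC l else (splitC l).modifyHead (c :: ·)

theorem splitC_ne_nil (l : List Char) : splitC l ≠ [] := by
  cases l with
  | nil => simp [splitC]
  | cons c l =>
    simp only [splitC]
    split
    · simp
    · cases h : splitC l with
      | nil => exact absurd h (splitC_ne_nil l)
      | cons a t => simp [List.modifyHead]

theorem splitOn_go_eq (fuel : Nat) (l cur : List Char) (acc : List (List Char))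
    (h : l.length < fuel) :
    PySem.Chars.splitOn.go [','] fuel l cur acc
      = acc.reverse ++ (splitC l).modifyHead (cur.reverse ++ ·) := by
  induction fuel generalizing l cur acc with
  | zero => omega
  | succ fuel ih =>
    cases l with
    | nil => simp [PySem.Chars.splitOn.go, splitC]
    | cons c rest =>
      obtain ⟨a, t, hat⟩ := List.exists_cons_of_ne_nil (splitC_ne_nil rest)
      by_cases hc : c = ','
      · subst hc
        rw [show PySem.Chars.splitOn.go [','] (fuel + 1) (',' :: rest) cur acc
              = PySem.Chars.splitOn.go [','] fuel (List.drop 1 (',' :: rest)) []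
                  (cur.reverse :: acc) by
            simp [PySem.Chars.splitOn.go, List.isPrefixOf]]
        rw [List.drop_one, List.tail_cons, ih rest [] (cur.reverse :: acc) (by simp at h; omega)]
        simp [splitC, hat, List.modifyHead]
      · rw [show PySem.Chars.splitOn.go [','] (fuel + 1) (c :: rest) cur acc
              = PySem.Chars.splitOn.go [','] fuel rest (c :: cur) acc by
            simp [PySem.Chars.splitOn.go, List.isPrefixOf, Ne.symm hc]]
        rw [ih rest (c :: cur) acc (by simp at h; omega)]
        simp [splitC, if_neg hc, hat, List.modifyHead]

theorem splitOn_eq (l : List Char) : PySem.Chars.splitOn l [','] = splitC l := by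
  unfold PySem.Chars.splitOn
  rw [splitOn_go_eq _ _ _ _ (by omega)]
  obtain ⟨a, t, hat⟩ := List.exists_cons_of_ne_nil (splitC_ne_nil l)
  simp [hat, List.modifyHead]

theorem splitC_append (a r : List Char) (h : ∀ c ∈ a, c ≠ ',') :
    splitC (a ++ ',' :: r) = a :: splitC r := by
  induction a with
  | nil => simp [splitC]
  | cons c a ih =>
    have hc : c ≠ ',' := h c (by simp)
    simp only [List.cons_append, splitC, if_neg hc,
      ih (fun x hx => h x (by simp [hx]))]
    rfl

-- ---- digits of a Nat, most significant first ----
def digitsOf (m : Nat) : List Nat :=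
  if m < 10 then [m] else digitsOf (m / 10) ++ [m % 10]
decreasing_by exact Nat.div_lt_self (by omega) (by omega)

theorem digitsOf_lt (m : Nat) : ∀ k ∈ digitsOf m, k < 10 := by
  induction m using Nat.strong_induction_on with
  | _ m ih =>
    rw [digitsOf]
    split
    · intro k hk; simp at hk; omega
    · intro k hk
      simp only [List.mem_append, List.mem_singleton] at hk
      rcases hk with hk | hk
      · exact ih (m / 10) (Nat.div_lt_self (by omega) (by omega)) k hk
      · omega

theorem digitsOf_ne_nil (m : Nat) : digitsOf m ≠ [] := by
  rw [digitsOf]; split <;> simp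

theorem toDigits_eq (m : Nat) : Nat.toDigits 10 m = (digitsOf m).map Nat.digitChar := by
  induction m using Nat.strong_induction_on with
  | _ m ih =>
    rw [Nat.toDigits_eq_if (by norm_num), digitsOf]
    split
    · simp
    · rw [ih (m / 10) (Nat.div_lt_self (by omega) (by omega))]
      simp

theorem digitsOf_val (m : Nat) :
    (digitsOf m).foldl (fun x k => x * 10 + k) 0 = m := by
  induction m using Nat.strong_induction_on with
  | _ m ih =>
    rw [digitsOf]
    split
    · simp
    · rw [List.foldl_append, ih (m / 10) (Nat.div_lt_self (by omega) (by omega))]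
      simp only [List.foldl_cons, List.foldl_nil]
      omega

theorem peelNeg (o : Option Nat) (m : Nat) (r : Int) (h : o = some m) (hr : -(m : Int) = r) :
    Option.map (fun n : Int => -n) (do let a ← o; pure ((a : Nat) : Int)) = some r := by
  subst h; subst hr; rfl

theorem peelPos (o : Option Nat) (m : Nat) (r : Int) (h : o = some m) (hr : ((m : Nat) : Int) = r) :
    Option.map (fun n : Int => n) (do let a ← o; pure ((a : Nat) : Int)) = some r := by
  subst h; subst hr; rfl

theorem dropWhile_eq_self_of_all {p : Char → Bool} (l : List Char)
    (h : ∀ c ∈ l, p c = false) : l.dropWhile p = l := by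
  cases l with
  | nil => rfl
  | cons c l => simp [h c (by simp)]

theorem strip_noop (l : List Char) (h : ∀ c ∈ l, PySem.Int.isIntSpace c = false) :
    (List.dropWhile PySem.Int.isIntSpace
      (List.dropWhile PySem.Int.isIntSpace l).reverse).reverse = l := by
  rw [dropWhile_eq_self_of_all l h,
      dropWhile_eq_self_of_all l.reverse (by intro c hc; exact h c (List.mem_reverse.mp hc)),
      List.reverse_reverse]

theorem digitChar_not_space (k : Nat) (hk : k < 10) :
    PySem.Int.isIntSpace (Nat.digitChar k) = false := by
  interval_cases k <;> decide

theorem digitChar_ne_comma (k : Nat) (hk : k < 10) : Nat.digitChar k ≠ ',' := by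
  interval_cases k <;> decide

theorem toChars_no_comma (n : Int) : ∀ c ∈ PySem.Int.toChars n, c ≠ ',' := by
  intro c hc
  unfold PySem.Int.toChars at hc
  split at hc
  · rw [toDigits_eq] at hc
    simp only [List.mem_cons, List.mem_map] at hc
    rcases hc with rfl | ⟨k, hk, rfl⟩
    · decide
    · exact digitChar_ne_comma k (digitsOf_lt _ k hk)
  · rw [toDigits_eq] at hc
    simp only [List.mem_map] at hc
    obtain ⟨k, hk, rfl⟩ := hc
    exact digitChar_ne_comma k (digitsOf_lt _ k hk)

theorem digitChar_toNat (k : Nat) (hk : k < 10) :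
    (Nat.digitChar k).toNat - '0'.toNat = k := by
  interval_cases k <;> rfl

theorem ofChars_toChars (n : Int) : PySem.Int.ofChars? (PySem.Int.toChars n) = some n := by
  unfold PySem.Int.toChars
  split
  · rename_i hneg
    rw [toDigits_eq]
    have hall : ∀ c ∈ '-' :: (digitsOf n.natAbs).map Nat.digitChar,
        PySem.Int.isIntSpace c = false := by
      intro c hc
      simp only [List.mem_cons, List.mem_map] at hc
      rcases hc with rfl | ⟨k, hk, rfl⟩
      · decide
      · exact digitChar_not_space k (digitsOf_lt _ k hk)
    unfold PySem.Int.ofChars?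
    rw [strip_noop _ hall]
    obtain ⟨k, ds, hds⟩ := List.exists_cons_of_ne_nil (digitsOf_ne_nil n.natAbs)
    rw [hds, List.map_cons]
    apply peelNeg _ ((k :: ds).foldl (fun x j => x * 10 + j) 0)
    · have hk : k < 10 := digitsOf_lt _ k (by rw [hds]; simp)
      have hds' : ∀ j ∈ ds, j < 10 := fun j hj => digitsOf_lt _ j (by rw [hds]; simp [hj])
      clear hds hall hneg
      simp only [List.foldl_cons]
      rw [show (0 * 10 + k : Nat) = (0 * 10 + ((Nat.digitChar k).toNat - '0'.toNat) : Nat) by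
        rw [digitChar_toNat k hk]]
      generalize ha : (0 * 10 + ((Nat.digitChar k).toNat - '0'.toNat) : Nat) = a
      interval_cases k <;> (conv_lhs => whnf) <;> rw [ha] <;> clear ha <;>
        (revert hds'
         induction ds generalizing a with
         | nil => intro _; rfl
         | cons d ds ih =>
           intro hall
           have hd : d < 10 := hall d (by simp)
           simp only [List.map_cons, List.foldl_cons]
           rw [show (a * 10 + d : Nat) = (a * 10 + ((Nat.digitChar d).toNat - '0'.toNat) : Nat) by
             rw [digitChar_toNat d hd]]
           generalize ha2 : (a * 10 + ((Nat.digitChar d).toNat - '0'.toNat) : Nat) = a2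
           interval_cases d <;> (conv_lhs => whnf) <;> rw [ha2] <;>
             exact ih _ (fun j hj => hall j (by simp [hj])))
    · rw [← hds, digitsOf_val]
      omega
  · rename_i hneg
    rw [toDigits_eq]
    have hall : ∀ c ∈ (digitsOf n.toNat).map Nat.digitChar,
        PySem.Int.isIntSpace c = false := by
      intro c hc
      simp only [List.mem_map] at hc
      obtain ⟨j, hj, rfl⟩ := hc
      exact digitChar_not_space j (digitsOf_lt _ j hj)
    unfold PySem.Int.ofChars?
    rw [strip_noop _ hall]
    obtain ⟨k, ds, hds⟩ := List.exists_cons_of_ne_nil (digitsOf_ne_nil n.toNat)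
    have hk : k < 10 := digitsOf_lt _ k (by rw [hds]; simp)
    have hds' : ∀ j ∈ ds, j < 10 := fun j hj => digitsOf_lt _ j (by rw [hds]; simp [hj])
    have hkd : Nat.digitChar k ≠ '-' ∧ Nat.digitChar k ≠ '+' := by
      constructor <;> (interval_cases k <;> decide)
    rw [hds, List.map_cons]
    dsimp only []
    split
    · rename_i ds2 heq
      exact absurd (List.head_eq_of_cons_eq heq) hkd.1
    · rename_i ds2 heq
      exact absurd (List.head_eq_of_cons_eq heq) hkd.2
    · rename_i hne1 hne2
      apply peelPos _ ((k :: ds).foldl (fun x j => x * 10 + j) 0)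
      · clear hds hall hkd hneg hne1 hne2
        simp only [List.foldl_cons]
        rw [show (0 * 10 + k : Nat) = (0 * 10 + ((Nat.digitChar k).toNat - '0'.toNat) : Nat) by
          rw [digitChar_toNat k hk]]
        generalize ha : (0 * 10 + ((Nat.digitChar k).toNat - '0'.toNat) : Nat) = a
        interval_cases k <;> (conv_lhs => whnf) <;> rw [ha] <;> clear ha <;>
          (revert hds'
           induction ds generalizing a with
           | nil => intro _; rfl
           | cons d ds ih =>
             intro hall2
             have hd : d < 10 := hall2 d (by simp)
             simp only [List.map_cons, List.foldl_cons]
             rw [show (a * 10 + d : Nat) = (a * 10 + ((Nat.digitChar d).toNat - '0'.toNat) : Nat) by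
               rw [digitChar_toNat d hd]]
             generalize ha2 : (a * 10 + ((Nat.digitChar d).toNat - '0'.toNat) : Nat) = a2
             interval_cases d <;> (conv_lhs => whnf) <;> rw [ha2] <;>
               exact ih _ (fun j hj => hall2 j (by simp [hj])))
      · rw [← hds, digitsOf_val]
        omega


-- ---- row encoding/decoding ----
def encodeRow (v : List Int) : List Char :=
  v.foldr (fun i r => PySem.Int.toChars i ++ ',' :: r) []

def parseRow (l : List Char) : List Int :=
  ((splitC l).dropLast).map (fun j => (PySem.Int.ofChars? j).getD 0)

theorem parse_encode (v : List Int) : parseRow (encodeRow v) = v := by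
  induction v with
  | nil => rfl
  | cons i v ih =>
    have hsp : splitC (encodeRow (i :: v)) = PySem.Int.toChars i :: splitC (encodeRow v) := by
      simpa [encodeRow] using splitC_append (PySem.Int.toChars i) (encodeRow v) (toChars_no_comma i)
    unfold parseRow at ih ⊢
    rw [hsp, List.dropLast_cons_of_ne_nil (splitC_ne_nil _), List.map_cons, ih,
      ofChars_toChars]
    rfl

-- ---- the common Cartesian product ----
def prodFrom (e s : List Int) (dim : Nat) : List (List Int) :=
  if dim = s.length then [[]]
  else if hd : dim < s.length then
    (PySem.List.pyRange (min (PySem.List.pyGetD e (dim : Int) 0) (PySem.List.pyGetD s (dim : Int) 0))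
       (max (PySem.List.pyGetD e (dim : Int) 0) (PySem.List.pyGetD s (dim : Int) 0) + 1) 1).flatMap
      (fun i => (prodFrom e s (dim + 1)).map (fun p => i :: p))
  else []
termination_by s.length - dim

theorem getPoint_eq (e s : List Int) (dim : Nat) :
    pvGetPoint e s dim = (prodFrom e s dim).map encodeRow := by
  by_cases heq : dim = s.length
  · rw [pvGetPoint, prodFrom, if_pos heq, if_pos heq]; rfl
  · by_cases hlt : dim < s.length
    · rw [pvGetPoint, prodFrom, if_neg heq, if_neg heq, dif_pos hlt, dif_pos hlt]
      have ih := getPoint_eq e s (dim + 1)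
      rw [ih]
      simp only [PySem.List.foldl_append_singleton_eq_map, List.nil_append,
        PySem.List.foldl_append_eq_flatMap, List.map_flatMap, List.map_map]
      split
      · rename_i hes
        rw [min_eq_left hes.le, max_eq_right hes.le]
        rfl
      · rename_i hes
        rw [min_eq_right (by omega), max_eq_left (by omega)]
        rfl
    · rw [pvGetPoint, prodFrom, if_neg heq, if_neg heq, dif_neg hlt, dif_neg hlt]; rfl
termination_by s.length - dim

theorem A_eq_prod (cb : List Int × List Int) :
    Enumeration cb = prodFrom cb.1 cb.2 0 := by
  show (pvGetPoint cb.1 cb.2 0).foldl (fun exp i =>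
      exp ++ [(PySem.List.slice (PySem.Chars.splitOn i [',']) none (some (-1))).foldl
        (fun v j => v ++ [(PySem.Int.ofChars? j).getD 0]) ([] : List Int)]) []
    = prodFrom cb.1 cb.2 0
  simp only [PySem.List.slice_to_neg_one, PySem.List.foldl_append_singleton_eq_map,
    List.nil_append, splitOn_eq]
  rw [getPoint_eq, List.map_map]
  refine (List.map_congr_left ?_).trans (List.map_id _)
  intro row _
  exact parse_encode row

theorem foldrProd (e s : List Int) (j : Nat) (hj : j ≤ s.length) :
    (PySem.List.pyRange (j : Int) (s.length : Int) 1).foldr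
      (fun d points =>
        (PySem.List.pyRange (min (PySem.List.pyGetD e d 0) (PySem.List.pyGetD s d 0))
            (max (PySem.List.pyGetD e d 0) (PySem.List.pyGetD s d 0) + 1) 1).flatMap
          (fun i => points.map (fun p => i :: p)))
      [[]] = prodFrom e s j := by
  by_cases hlt : j < s.length
  · rw [PySem.List.pyRange_one_cons (by exact_mod_cast hlt), List.foldr_cons]
    rw [show ((j : Int) + 1) = ((j + 1 : Nat) : Int) by push_cast; ring]
    rw [foldrProd e s (j + 1) (by omega)]
    conv_rhs => rw [prodFrom]
    rw [if_neg (by omega : ¬ j = s.length), dif_pos hlt]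
  · have hje : j = s.length := by omega
    subst hje
    rw [PySem.List.pyRange_one_eq_nil (by omega), List.foldr_nil, prodFrom, if_pos rfl]
termination_by s.length - j

theorem B_eq_prod (cb : List Int × List Int) :
    Enumeration_alt cb = prodFrom cb.1 cb.2 0 := by
  show (PySem.List.pyRange ((cb.2.length : Int) - 1) (-1) (-1)).foldl
      (fun points d =>
        (PySem.List.pyRange (min (PySem.List.pyGetD cb.1 d 0) (PySem.List.pyGetD cb.2 d 0))
            (max (PySem.List.pyGetD cb.1 d 0) (PySem.List.pyGetD cb.2 d 0) + 1) 1).flatMap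
          (fun i => points.map (fun p => i :: p)))
      [[]] = prodFrom cb.1 cb.2 0
  rw [PySem.List.pyRange_neg_one_eq_reverse, List.foldl_reverse]
  rw [show ((-1 : Int) + 1) = ((0 : Nat) : Int) by norm_num,
      show ((cb.2.length : Int) - 1 + 1) = (cb.2.length : Int) by ring]
  exact foldrProd cb.1 cb.2 0 (by omega)

-- ===== VERDICT (by name: the statement is the Claim_ definition above) =====
theorem Enumeration_spec : Claim_equal_Enumeration := by
  intro cb _ _
  unfold Spec_Enumeration
  rw [A_eq_prod, B_eq_prod]
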